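-- pv_equiv track=rewrite | github.com/cp-study/leetcode-study | LC_2179.py | goodTriplets
-- ===== SOURCE A (Python) =====
-- class BIT:
--     def __init__(self, n):
--         self.sums = [0] * (n+1)
--
--     def update(self, i, delta):
--         while i < len(self.sums):
--             self.sums[i] += delta
--             i += i & (-i)
--
--     def query(self, i):
--         res = 0
--         while i > 0:
--             res += self.sums[i]
--             i -= i & (-i)
--         return res
--
-- def goodTriplets(A, B):
--     d = {x: i for i, x in enumerate(A)}
--     n = len(A)
--     arr = [d[B[i]] for i in range(n)]
--
--     BIT1, BIT2, ans = BIT(n), BIT(n), 0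
--     for i in arr:
--         ans += BIT2.query(i)
--         BIT1.update(i + 1, 1)
--         less = BIT1.query(i)
--         BIT2.update(i + 1, less)
--     return ans
-- ===== SOURCE B (Python) =====
-- def goodTriplets(A, B):
--     d = {x: i for i, x in enumerate(A)}
--     arr = [d[x] for x in B[0:len(A)]]
--     total = 0
--     pre = []
--     rest = arr
--     while rest:
--         v, rest = rest[0], rest[1:]
--         left = sum(1 for u in pre if u < v)
--         right = sum(1 for w in rest if w > v)
--         total += left * right
--         pre.append(v)
--     return total
-- ===== Notes on version B (the rewrite author's own statement) =====
-- stated objective: alternative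
-- what changed: Replaced the two-Fenwick-tree scan (which accumulates, per element, the number of increasing pairs ending below it) by a direct per-middle-element count: for each position, the number of smaller elements before it times the number of larger elements after it, summed; no BIT is used.
import Mathlib
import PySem

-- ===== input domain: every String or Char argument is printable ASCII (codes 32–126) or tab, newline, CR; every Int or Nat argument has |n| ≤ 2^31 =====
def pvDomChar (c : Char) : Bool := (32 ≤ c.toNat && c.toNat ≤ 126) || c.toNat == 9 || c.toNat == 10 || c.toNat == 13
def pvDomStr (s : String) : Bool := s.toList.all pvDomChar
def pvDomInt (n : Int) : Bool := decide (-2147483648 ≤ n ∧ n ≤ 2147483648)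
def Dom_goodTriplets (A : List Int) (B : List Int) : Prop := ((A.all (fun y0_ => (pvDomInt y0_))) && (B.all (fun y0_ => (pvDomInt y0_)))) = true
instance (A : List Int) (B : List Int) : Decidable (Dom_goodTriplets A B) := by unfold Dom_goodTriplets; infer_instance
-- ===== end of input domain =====

-- A counts increasing triples of the remapped list with two Fenwick trees; B counts them per middle
-- element (smaller-before times larger-after) with plain scans — an alternative decomposition, not faster.
-- Mutation note: neither implementation mutates its arguments observably.

-- ===== PORT A =====

-- d = {x: i for i, x in enumerate(A)}  (later occurrences overwrite earlier ones)
def aDict (A : List Int) : PySem.Dict Int Int :=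
  (PySem.List.enumerate A 0).foldl (fun d p => d.insert p.2 p.1) PySem.Dict.empty

-- BIT.update: `while i < len(sums): sums[i] += delta; i += i & (-i)`.
-- All calls have i ≥ 1 (update(i+1, 1) with i ≥ 0) so indexing by i.toNat is exact; the fuel
-- sums.length only makes the loop total: i grows by i & (-i) ≥ 1 per step, so it never runs out.
def bitUpdate (fuel : Nat) (sums : List Int) (i : Int) (delta : Int) : List Int :=
  match fuel with
  | 0 => sums
  | f + 1 =>
    if i < (sums.length : Int) then
      bitUpdate f (sums.set i.toNat (sums.getD i.toNat 0 + delta)) (i + PySem.Int.band i (-i)) delta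
    else sums

-- BIT.query: `res = 0; while i > 0: res += self.sums[i]; i -= i & (-i); return res`.
-- Fuel i.toNat suffices: i decreases by i & (-i) ≥ 1 per step while i > 0.
def bitQuery (fuel : Nat) (sums : List Int) (i : Int) (res : Int) : Int :=
  match fuel with
  | 0 => res
  | f + 1 =>
    if 0 < i then
      bitQuery f sums (i - PySem.Int.band i (-i)) (res + sums.getD i.toNat 0)
    else res

-- the body of `for i in arr: …` over state (BIT1.sums, BIT2.sums, ans)
def aStep (st : List Int × List Int × Int) (i : Int) : List Int × List Int × Int :=
  let ans := st.2.2 + bitQuery i.toNat st.2.1 i 0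
  let s1 := bitUpdate st.1.length st.1 (i + 1) 1
  let less := bitQuery i.toNat s1 i 0
  let s2 := bitUpdate st.2.1.length st.2.1 (i + 1) less
  (s1, s2, ans)

def goodTriplets (A : List Int) (B : List Int) : Int :=
  let d := aDict A
  let n := A.length
  -- arr = [d[B[i]] for i in range(n)]; inside Pre_ every B[i] (i < n ≤ len B) is a key of d,
  -- so the getD defaults are never taken.
  let arr := (List.range n).map (fun i => ((d.get? (B.getD i 0)).getD 0))
  (arr.foldl aStep (List.replicate (n + 1) 0, List.replicate (n + 1) 0, 0)).2.2

-- ===== PORT B =====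

-- the while loop of Source B: pop the head, count smaller-before and larger-after, accumulate
def altCount (pre : List Int) (rest : List Int) (total : Int) : Int :=
  match rest with
  | [] => total
  | v :: rs =>
      altCount (pre ++ [v]) rs
        (total + ((pre.filter (fun u => decide (u < v))).length : Int) *
                 ((rs.filter (fun w => decide (v < w))).length : Int))

def goodTriplets_alt (A : List Int) (B : List Int) : Int :=
  let d := (PySem.List.enumerate A 0).foldl (fun d p => d.insert p.2 p.1) PySem.Dict.empty
  -- arr = [d[x] for x in B[0:len(A)]]; inside Pre_ every such x is a key of d.
  let arr := (PySem.List.slice B (some 0) (some (A.length : Int))).map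
      (fun x => ((d.get? x).getD 0))
  altCount [] arr 0

-- ===== PRECONDITION & SPEC =====
-- Pre_ is exactly the set of inputs on which A returns normally: A raises IndexError when
-- len(B) < len(A) and KeyError when some of the first len(A) elements of B does not occur in A.
def Pre_goodTriplets (A : List Int) (B : List Int) : Prop :=
  A.length ≤ B.length ∧ ∀ x ∈ B.take A.length, x ∈ A
instance (A : List Int) (B : List Int) : Decidable (Pre_goodTriplets A B) := by
  unfold Pre_goodTriplets; infer_instance

def pvWitness_goodTriplets : List Int × List Int := ([5, 7, 9], [9, 5, 7])

def Spec_goodTriplets (A : List Int) (B : List Int) (out : Int) : Prop := out = goodTriplets_alt A B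
instance (A : List Int) (B : List Int) (out : Int) : Decidable (Spec_goodTriplets A B out) := by unfold Spec_goodTriplets; infer_instance

-- ===== CLAIM (what is proved, stated in full; the proofs are below) =====
def Claim_equal_goodTriplets : Prop := ∀ (A : List Int) (B : List Int), Dom_goodTriplets A B → Pre_goodTriplets A B → Spec_goodTriplets A B (goodTriplets A B)

-- ===== LEMMAS AND PROOFS =====

-- ---- lowbit arithmetic on Nat ----
def natLB (n : Nat) : Nat := n - (n &&& (n - 1))

theorem and_odd_even (m : Nat) : (2 * m + 1) &&& (2 * m) = 2 * m := by
  have := Nat.land_bit true m false m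
  simp [Nat.bit, Nat.and_self] at this
  omega

theorem and_even_odd (a b : Nat) : (2 * a) &&& (2 * b + 1) = 2 * (a &&& b) := by
  have := Nat.land_bit false a true b
  simp [Nat.bit] at this
  omega

theorem natLB_odd (m : Nat) : natLB (2 * m + 1) = 1 := by
  unfold natLB
  rw [show 2 * m + 1 - 1 = 2 * m by omega, and_odd_even]
  omega

theorem natLB_even (m : Nat) (hm : 1 ≤ m) : natLB (2 * m) = 2 * natLB m := by
  unfold natLB
  obtain ⟨k, rfl⟩ : ∃ k, m = k + 1 := ⟨m - 1, by omega⟩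
  rw [show 2 * (k + 1) - 1 = 2 * k + 1 by omega, and_even_odd]
  have h1 : (k + 1) &&& k ≤ k + 1 := Nat.and_le_left
  rw [show k + 1 - 1 = k from rfl]
  omega

theorem natLB_pos (n : Nat) (h : 1 ≤ n) : 1 ≤ natLB n := by
  induction n using Nat.strong_induction_on with
  | _ n ih =>
    rcases Nat.even_or_odd n with ⟨m, hm⟩ | ⟨m, hm⟩
    · subst hm
      rw [show m + m = 2 * m by ring, natLB_even m (by omega)]
      have := ih m (by omega) (by omega)
      omega
    · subst hm
      rw [natLB_odd]

theorem natLB_le (n : Nat) : natLB n ≤ n := by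
  unfold natLB
  omega

-- the interval-step lemma: for x ≠ u the Fenwick interval of x contains u iff it contains u + lowbit u
theorem natK (u x : Nat) (hu : 1 ≤ u) (hx : 1 ≤ x) (hne : x ≠ u) :
    ((x - natLB x < u ∧ u ≤ x) ↔ (x - natLB x < u + natLB u ∧ u + natLB u ≤ x)) := by
  induction u using Nat.strong_induction_on generalizing x with
  | _ u ih =>
    rcases Nat.even_or_odd u with ⟨a, hu2⟩ | ⟨a, hu2⟩
    · have ha : 1 ≤ a := by omega
      have hulb : natLB u = 2 * natLB a := by
        rw [hu2, show a + a = 2 * a by ring, natLB_even a ha]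
      have halb1 := natLB_pos a ha
      have halb2 := natLB_le a
      rcases Nat.even_or_odd x with ⟨b, hx2⟩ | ⟨b, hx2⟩
      · have hb : 1 ≤ b := by omega
        have hxlb : natLB x = 2 * natLB b := by
          rw [hx2, show b + b = 2 * b by ring, natLB_even b hb]
        have hblb1 := natLB_pos b hb
        have hblb2 := natLB_le b
        have := ih a (by omega) b (by omega) (by omega) (by omega)
        omega
      · have hxlb : natLB x = 1 := by rw [hx2]; exact natLB_odd b
        omega
    · have hulb : natLB u = 1 := by rw [hu2]; exact natLB_odd a
      rcases Nat.even_or_odd x with ⟨b, hx2⟩ | ⟨b, hx2⟩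
      · have hb : 1 ≤ b := by omega
        have hxlb : natLB x = 2 * natLB b := by
          rw [hx2, show b + b = 2 * b by ring, natLB_even b hb]
        have hblb1 := natLB_pos b hb
        have hblb2 := natLB_le b
        omega
      · have hxlb : natLB x = 1 := by rw [hx2]; exact natLB_odd b
        omega

-- ---- bridge to the Int ports ----
theorem band_neg_self (i : Int) (h : 0 < i) :
    PySem.Int.band i (-i) = ((natLB i.toNat : Nat) : Int) := by
  unfold PySem.Int.band natLB
  rw [if_pos (by omega), if_neg (by omega)]
  congr 1
  have hh : (-(-i) - 1).toNat = i.toNat - 1 := by omega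
  rw [hh]

-- ---- query as a well-founded function ----
def qVal (s : List Int) (q : Int) : Int :=
  if _hq : 0 < q then qVal s (q - PySem.Int.band q (-q)) + s.getD q.toNat 0 else 0
termination_by q.toNat
decreasing_by
  rw [band_neg_self q _hq]
  have h1 := natLB_pos q.toNat (by omega)
  have h2 := natLB_le q.toNat
  omega

theorem bitQuery_eq_qVal (fuel : Nat) : ∀ (s : List Int) (q res : Int), q.toNat ≤ fuel →
    bitQuery fuel s q res = res + qVal s q := by
  induction fuel with
  | zero =>
    intro s q res hf
    rw [qVal, dif_neg (by omega)]
    simp [bitQuery]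
  | succ f ih =>
    intro s q res hf
    by_cases hq : 0 < q
    · have h1 := natLB_pos q.toNat (by omega)
      have h2 := natLB_le q.toNat
      have hunf : qVal s q = qVal s (q - ((natLB q.toNat : Nat) : Int)) + s.getD q.toNat 0 := by
        conv_lhs => rw [qVal]
        rw [dif_pos hq, band_neg_self q hq]
      simp only [bitQuery, if_pos hq]
      rw [band_neg_self q hq, ih s (q - ((natLB q.toNat : Nat) : Int)) _ (by omega), hunf]
      ring
    · simp only [bitQuery, if_neg hq]
      rw [qVal, dif_neg hq]
      ring

theorem length_bitUpdate (fuel : Nat) : ∀ (s : List Int) (u δ : Int),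
    (bitUpdate fuel s u δ).length = s.length := by
  induction fuel with
  | zero => intro s u δ; rfl
  | succ f ih =>
    intro s u δ
    simp only [bitUpdate]
    split
    · rw [ih, List.length_set]
    · rfl

theorem bitUpdate_getD (fuel : Nat) : ∀ (s : List Int) (u δ : Int), 1 ≤ u →
    s.length ≤ fuel + u.toNat → ∀ x : Int, 0 ≤ x → x < (s.length : Int) →
    (bitUpdate fuel s u δ).getD x.toNat 0 =
      s.getD x.toNat 0 + (if x - PySem.Int.band x (-x) < u ∧ u ≤ x then δ else 0) := by
  induction fuel with
  | zero =>
    intro s u δ hu hf x hx hxl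
    rw [if_neg (by rintro ⟨-, h2⟩; omega)]
    simp [bitUpdate]
  | succ f ih =>
    intro s u δ hu hf x hx hxl
    simp only [bitUpdate]
    by_cases hi : u < (s.length : Int)
    · rw [if_pos hi]
      have hupos : (0 : Int) < u := by omega
      have hLB1 := natLB_pos u.toNat (by omega)
      have hLBle := natLB_le u.toNat
      have hbu : PySem.Int.band u (-u) = ((natLB u.toNat : Nat) : Int) := band_neg_self u hupos
      set s' := s.set u.toNat (s.getD u.toNat 0 + δ) with hs'
      have hlen' : s'.length = s.length := List.length_set ..
      have hu'1 : (1 : Int) ≤ u + PySem.Int.band u (-u) := by rw [hbu]; omega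
      have hu'nat : s.length ≤ f + (u + PySem.Int.band u (-u)).toNat := by rw [hbu]; omega
      have hxl' : x < (s'.length : Int) := by rw [hlen']; exact hxl
      have hrec := ih s' (u + PySem.Int.band u (-u)) δ hu'1 (by rw [hlen']; exact hu'nat) x hx hxl'
      rw [hrec]
      have hux : u.toNat < s.length := by omega
      by_cases hxu : x = u
      · subst hxu
        have hself : s'.getD x.toNat 0 = s.getD x.toNat 0 + δ := by
          rw [hs']
          simp [List.getD_eq_getElem?_getD, hux]
        rw [hself]
        have hbx : PySem.Int.band x (-x) = ((natLB x.toNat : Nat) : Int) := band_neg_self x hupos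
        rw [if_neg (by rw [hbx]; rintro ⟨-, h2⟩; omega), if_pos (by rw [hbx]; constructor <;> omega)]
        ring
      · have hne : x.toNat ≠ u.toNat := by omega
        have hsame : s'.getD x.toNat 0 = s.getD x.toNat 0 := by
          rw [hs']
          simp [List.getD_eq_getElem?_getD, List.getElem?_set_ne (Ne.symm hne)]
        rw [hsame]
        congr 1
        by_cases hx0 : x = 0
        · subst hx0
          rw [if_neg (by rintro ⟨-, h2⟩; omega), if_neg (by rintro ⟨-, h2⟩; omega)]
        · have hxpos : (0 : Int) < x := by omega
          have hbx : PySem.Int.band x (-x) = ((natLB x.toNat : Nat) : Int) := band_neg_self x hxpos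
          have hK := natK u.toNat x.toNat (by omega) (by omega) (by omega)
          have hxLB1 := natLB_pos x.toNat (by omega)
          have hxLBle := natLB_le x.toNat
          have hiff : (x - PySem.Int.band x (-x) < u ∧ u ≤ x) ↔
              (x - PySem.Int.band x (-x) < u + PySem.Int.band u (-u) ∧
               u + PySem.Int.band u (-u) ≤ x) := by
            rw [hbx, hbu]; omega
          rw [if_congr hiff rfl rfl]
    · rw [if_neg hi, if_neg (by rintro ⟨-, h2⟩; omega)]
      simp

theorem qVal_update_aux (s : List Int) (u δ : Int) (hu : 1 ≤ u) :
    ∀ (n : Nat) (q : Int), q.toNat = n → 0 ≤ q → q < (s.length : Int) →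
    qVal (bitUpdate s.length s u δ) q = qVal s q + (if u ≤ q then δ else 0) := by
  intro n
  induction n using Nat.strong_induction_on with
  | _ n ih =>
    intro q hqn hq hql
    by_cases hq0 : 0 < q
    · have h1 := natLB_pos q.toNat (by omega)
      have h2 := natLB_le q.toNat
      have hbq : PySem.Int.band q (-q) = ((natLB q.toNat : Nat) : Int) := band_neg_self q hq0
      have hunfold : ∀ t : List Int,
          qVal t q = qVal t (q - PySem.Int.band q (-q)) + t.getD q.toNat 0 := by
        intro t
        conv_lhs => rw [qVal]
        rw [dif_pos hq0]
      rw [hunfold, hunfold]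
      have hupd := bitUpdate_getD s.length s u δ hu (by omega) q hq hql
      have hrec := ih (q - PySem.Int.band q (-q)).toNat (by rw [hbq]; omega)
        (q - PySem.Int.band q (-q)) rfl (by rw [hbq]; omega) (by rw [hbq]; omega)
      rw [hupd, hrec]
      split_ifs <;> omega
    · rw [qVal, dif_neg hq0, qVal, dif_neg hq0, if_neg (by omega)]
      ring

theorem qVal_update (s : List Int) (u δ q : Int) (hu : 1 ≤ u) (_hul : u < (s.length : Int))
    (hq : 0 ≤ q) (hql : q < (s.length : Int)) :
    qVal (bitUpdate s.length s u δ) q = qVal s q + (if u ≤ q then δ else 0) :=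
  qVal_update_aux s u δ hu q.toNat q rfl hq hql

theorem qVal_replicate_aux (n : Nat) : ∀ (m : Nat) (q : Int), q.toNat = m →
    qVal (List.replicate n (0 : Int)) q = 0 := by
  intro m
  induction m using Nat.strong_induction_on with
  | _ m ih =>
    intro q hqm
    by_cases hq0 : 0 < q
    · have h1 := natLB_pos q.toNat (by omega)
      have h2 := natLB_le q.toNat
      have hbq := band_neg_self q hq0
      rw [qVal, dif_pos hq0]
      rw [ih (q - PySem.Int.band q (-q)).toNat (by rw [hbq]; omega) _ rfl]
      simp [List.getD_eq_getElem?_getD, List.getElem?_replicate]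
      split <;> simp
    · rw [qVal, dif_neg hq0]

theorem qVal_replicate (n : Nat) (q : Int) : qVal (List.replicate n 0) q = 0 :=
  qVal_replicate_aux n q.toNat q rfl

-- ---- counting functions ----
def cntLT (p : List Int) (v : Int) : Int := ((p.filter (fun u => decide (u < v))).length : Int)
def cntGT (p : List Int) (v : Int) : Int := ((p.filter (fun u => decide (v < u))).length : Int)

-- number of pairs i < j inside pre0 ++ p with the SECOND component inside p, both < q
def c2 (pre : List Int) (p : List Int) (q : Int) : Int :=
  match p with
  | [] => 0
  | a :: rs => (if a < q then cntLT pre a else 0) + c2 (pre ++ [a]) rs q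

-- total contribution of A's loop over `rest` after prefix `pre`
def bsum (pre : List Int) (rest : List Int) : Int :=
  match rest with
  | [] => 0
  | a :: rs => c2 [] pre a + bsum (pre ++ [a]) rs

def xsum (pre : List Int) (l : List Int) : Int := (l.map (fun a => c2 [] pre a)).sum

theorem cntLT_append (p : List Int) (a q : Int) :
    cntLT (p ++ [a]) q = cntLT p q + (if a < q then 1 else 0) := by
  unfold cntLT
  rw [List.filter_append]
  by_cases h : a < q <;> simp [h]

theorem c2_append (p : List Int) : ∀ (pre : List Int) (a q : Int),
    c2 pre (p ++ [a]) q = c2 pre p q + (if a < q then cntLT (pre ++ p) a else 0) := by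
  induction p with
  | nil => intro pre a q; simp [c2]
  | cons b rs ih =>
    intro pre a q
    simp only [List.cons_append, c2, ih (pre ++ [b]) a q, List.append_assoc, List.cons_append,
      List.nil_append]
    ring

theorem c2_nil_append (p : List Int) (a q : Int) :
    c2 [] (p ++ [a]) q = c2 [] p q + (if a < q then cntLT p a else 0) := by
  simpa using c2_append p [] a q

-- ---- A's loop ----
theorem aLoop (n : Nat) : ∀ (rest pre : List Int) (s1 s2 : List Int) (ans : Int),
    (∀ v ∈ rest, 0 ≤ v ∧ v < (n : Int)) →
    s1.length = n + 1 → s2.length = n + 1 →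
    (∀ q : Int, 0 ≤ q → q ≤ (n : Int) → qVal s1 q = cntLT pre q) →
    (∀ q : Int, 0 ≤ q → q ≤ (n : Int) → qVal s2 q = c2 [] pre q) →
    (rest.foldl aStep (s1, s2, ans)).2.2 = ans + bsum pre rest := by
  intro rest
  induction rest with
  | nil => intro pre s1 s2 ans _ _ _ _ _; simp [bsum]
  | cons v rs ih =>
    intro pre s1 s2 ans hvals hl1 hl2 H1 H2
    obtain ⟨hv0, hvn⟩ := hvals v (by simp)
    rw [List.foldl_cons]
    have hq2 : bitQuery v.toNat s2 v 0 = qVal s2 v := by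
      rw [bitQuery_eq_qVal v.toNat s2 v 0 le_rfl]; ring
    set s1' := bitUpdate s1.length s1 (v + 1) 1 with hs1'
    set less := bitQuery v.toNat s1' v 0 with hless
    set s2' := bitUpdate s2.length s2 (v + 1) less with hs2'
    have hstep : aStep (s1, s2, ans) v = (s1', s2', ans + bitQuery v.toNat s2 v 0) := rfl
    rw [hstep]
    have hl1' : s1'.length = n + 1 := by rw [hs1', length_bitUpdate, hl1]
    have hl2' : s2'.length = n + 1 := by rw [hs2', length_bitUpdate, hl2]
    have H1' : ∀ q : Int, 0 ≤ q → q ≤ (n : Int) → qVal s1' q = cntLT (pre ++ [v]) q := by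
      intro q hq hqn
      rw [hs1', qVal_update s1 (v + 1) 1 q (by omega) (by rw [hl1]; push_cast; omega) hq
        (by rw [hl1]; push_cast; omega), H1 q hq hqn, cntLT_append]
      split_ifs <;> omega
    have hlessval : less = cntLT pre v := by
      rw [hless, bitQuery_eq_qVal v.toNat s1' v 0 le_rfl,
        H1' v hv0 (by omega), cntLT_append]
      simp
    have H2' : ∀ q : Int, 0 ≤ q → q ≤ (n : Int) → qVal s2' q = c2 [] (pre ++ [v]) q := by
      intro q hq hqn
      rw [hs2', qVal_update s2 (v + 1) less q (by omega) (by rw [hl2]; push_cast; omega) hq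
        (by rw [hl2]; push_cast; omega), H2 q hq hqn, c2_nil_append, hlessval]
      split_ifs <;> omega
    rw [ih (pre ++ [v]) s1' s2' _ (fun w hw => hvals w (by simp [hw])) hl1' hl2' H1' H2']
    rw [hq2, H2 v hv0 (by omega)]
    simp [bsum]
    ring

-- ---- the Fubini step: B's per-middle sums equal A's per-last sums ----
theorem xsum_append (pre l : List Int) (v : Int) :
    xsum (pre ++ [v]) l = xsum pre l + cntLT pre v * cntGT l v := by
  induction l with
  | nil => simp [xsum, cntGT]
  | cons a l ih =>
    simp only [xsum, List.map_cons, List.sum_cons] at *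
    rw [ih, c2_nil_append]
    unfold cntGT
    rw [List.filter_cons]
    by_cases h : v < a <;> simp [h] <;> ring

theorem altCount_eq_bsum : ∀ (l pre : List Int) (t : Int),
    altCount pre l t + xsum pre l = t + bsum pre l := by
  intro l
  induction l with
  | nil => intro pre t; simp [altCount, xsum, bsum]
  | cons v rs ih =>
    intro pre t
    have hstep : altCount pre (v :: rs) t =
        altCount (pre ++ [v]) rs (t + cntLT pre v * cntGT rs v) := rfl
    have hIH := ih (pre ++ [v]) (t + cntLT pre v * cntGT rs v)
    have hxa := xsum_append pre rs v
    have hxc : xsum pre (v :: rs) = c2 [] pre v + xsum pre rs := by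
      simp [xsum]
    have hbc : bsum pre (v :: rs) = c2 [] pre v + bsum (pre ++ [v]) rs := rfl
    rw [hstep, hxc, hbc]
    linarith

-- ---- dict facts ----
theorem dict_fold_bound (N : Int) : ∀ (l : List (Int × Int)) (d : PySem.Dict Int Int),
    (∀ x v : Int, d.get? x = some v → 0 ≤ v ∧ v < N) →
    (∀ p ∈ l, 0 ≤ p.1 ∧ p.1 < N) →
    ∀ x v : Int, ((l.foldl (fun d p => d.insert p.2 p.1) d).get? x = some v) → 0 ≤ v ∧ v < N := by
  intro l
  induction l with
  | nil => intro d hd _ x v h; exact hd x v h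
  | cons p l ih =>
    intro d hd hl x v h
    rw [List.foldl_cons] at h
    refine ih (d.insert p.2 p.1) ?_ (fun q hq => hl q (by simp [hq])) x v h
    intro y w hyw
    rw [PySem.Dict.get?_insert] at hyw
    by_cases hy : y = p.2
    · rw [if_pos hy] at hyw
      have : w = p.1 := by exact (Option.some.inj hyw.symm)
      subst this
      exact hl p (by simp)
    · rw [if_neg hy] at hyw
      exact hd y w hyw

theorem aDict_value_bound (A : List Int) (x v : Int) :
    (aDict A).get? x = some v → 0 ≤ v ∧ v < (A.length : Int) := by
  intro h
  refine dict_fold_bound (A.length : Int) (PySem.List.enumerate A 0) PySem.Dict.empty ?_ ?_ x v h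
  · intro y w hw
    rw [PySem.Dict.get?_empty] at hw
    exact absurd hw (by simp)
  · intro p hp
    have hmem : p.1 ∈ (PySem.List.enumerate A 0).map (fun q => q.1) := List.mem_map_of_mem hp
    rw [PySem.List.map_fst_enumerate] at hmem
    have := PySem.List.mem_pyRange_one.mp (by simpa using hmem)
    omega

theorem dict_fold_isSome : ∀ (l : List (Int × Int)) (d : PySem.Dict Int Int) (x : Int),
    (x ∈ l.map (fun p => p.2) ∨ (d.get? x).isSome) →
    ((l.foldl (fun d p => d.insert p.2 p.1) d).get? x).isSome := by
  intro l
  induction l with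
  | nil =>
    intro d x h
    rcases h with h | h
    · simp at h
    · exact h
  | cons p l ih =>
    intro d x h
    rw [List.foldl_cons]
    refine ih (d.insert p.2 p.1) x ?_
    by_cases hx : x = p.2
    · right
      rw [PySem.Dict.get?_insert, if_pos hx]
      rfl
    · rcases h with h | h
      · simp only [List.map_cons, List.mem_cons] at h
        rcases h with h | h
        · exact absurd h hx
        · left; exact h
      · right
        rw [PySem.Dict.get?_insert, if_neg hx]
        exact h

theorem aDict_mem_isSome (A : List Int) (x : Int) (hx : x ∈ A) :
    ((aDict A).get? x).isSome := by
  refine dict_fold_isSome (PySem.List.enumerate A 0) PySem.Dict.empty x (Or.inl ?_)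
  rw [PySem.List.map_snd_enumerate]
  exact hx

-- ---- the two arrays are equal ----
theorem range_map_getD (B : List Int) (n : Nat) (h : n ≤ B.length) :
    (List.range n).map (fun i => B.getD i 0) = B.take n := by
  apply List.ext_getElem
  · simp; omega
  · intro i h1 h2
    simp only [List.getElem_map, List.getElem_range, List.getElem_take]
    rw [List.getD_eq_getElem?_getD, List.getElem?_eq_getElem (by simp at h1; omega)]
    rfl

theorem arr_eq (A B : List Int) (h : A.length ≤ B.length) :
    (List.range A.length).map (fun i => (((aDict A).get? (B.getD i 0)).getD 0)) =
    (PySem.List.slice B (some 0) (some (A.length : Int))).map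
      (fun x => (((aDict A).get? x).getD 0)) := by
  rw [PySem.List.slice_toNat B le_rfl (by positivity)]
  simp only [Int.toNat_zero, Int.toNat_natCast, Nat.sub_zero, List.drop_zero]
  rw [← range_map_getD B A.length h, List.map_map]
  rfl

-- ===== VERDICT (by name: the statement is the Claim_ definition above) =====
theorem mem_take_of_getD (B : List Int) (n i : Nat) (hi : i < n) (hn : n ≤ B.length) :
    B.getD i 0 ∈ B.take n := by
  have hib : i < B.length := by omega
  have h1 : B.getD i 0 = B[i] := by
    rw [List.getD_eq_getElem?_getD, List.getElem?_eq_getElem hib]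
    rfl
  have h2 : (B.take n)[i]'(by simp; omega) = B[i] := List.getElem_take
  rw [h1, ← h2]
  exact List.getElem_mem _

theorem goodTriplets_spec : Claim_equal_goodTriplets := by
  unfold Claim_equal_goodTriplets
  intro A B _ hPre
  obtain ⟨hlen, hmem⟩ := hPre
  unfold Spec_goodTriplets
  simp only [goodTriplets, goodTriplets_alt]
  have hdict : (PySem.List.enumerate A 0).foldl (fun d p => d.insert p.2 p.1) PySem.Dict.empty
      = aDict A := rfl
  rw [hdict, ← arr_eq A B hlen]
  set arr := (List.range A.length).map (fun i => (((aDict A).get? (B.getD i 0)).getD 0)) with harr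
  have hvals : ∀ v ∈ arr, 0 ≤ v ∧ v < (A.length : Int) := by
    intro v hv
    rw [harr] at hv
    obtain ⟨i, hi, rfl⟩ := List.mem_map.mp hv
    have hin : i < A.length := List.mem_range.mp hi
    have hxA : B.getD i 0 ∈ A := hmem _ (mem_take_of_getD B A.length i hin hlen)
    obtain ⟨w, hw⟩ := Option.isSome_iff_exists.mp (aDict_mem_isSome A _ hxA)
    rw [hw]
    exact aDict_value_bound A _ w hw
  have hA := aLoop A.length arr [] (List.replicate (A.length + 1) 0)
    (List.replicate (A.length + 1) 0) 0 hvals (by simp) (by simp)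
    (fun q hq hqn => by rw [qVal_replicate]; simp [cntLT])
    (fun q hq hqn => by rw [qVal_replicate]; rfl)
  rw [hA]
  have hB := altCount_eq_bsum arr [] 0
  have hx0 : xsum [] arr = 0 := by
    simp [xsum, c2]
  rw [hx0] at hB
  linarith
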